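-- pv_equiv track=rewrite | github.com/qc-lab/QHyper | demo/network_community_detection/utils/utils.py | communities_from_sample
-- ===== SOURCE A (Python) =====
-- def communities_from_sample(sample: dict, N_communities: int) -> list:
--     communities: list = []
--     for k in range(N_communities):
--         comm = []
--         for i in sample:
--             if sample[i] == k:
--                 comm.append(i)
--         communities.append(set(comm))
--
--     return communities
-- ===== SOURCE B (Python) =====
-- def communities_from_sample(sample: dict, N_communities: int) -> list:
--     # single pass over the sample: bucket each key by its community value
--     buckets = [[] for _ in range(N_communities)]
--     for key, value in sample.items():
--         if 0 <= value < N_communities: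
--             buckets[value].append(key)
--     return [set(b) for b in buckets]
-- ===== Notes on version B (the rewrite author's own statement) =====
-- stated objective: faster
-- what changed: replaces the per-community rescans of the whole sample by a single pass that appends each key to the bucket indexed by its value
import Mathlib
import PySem

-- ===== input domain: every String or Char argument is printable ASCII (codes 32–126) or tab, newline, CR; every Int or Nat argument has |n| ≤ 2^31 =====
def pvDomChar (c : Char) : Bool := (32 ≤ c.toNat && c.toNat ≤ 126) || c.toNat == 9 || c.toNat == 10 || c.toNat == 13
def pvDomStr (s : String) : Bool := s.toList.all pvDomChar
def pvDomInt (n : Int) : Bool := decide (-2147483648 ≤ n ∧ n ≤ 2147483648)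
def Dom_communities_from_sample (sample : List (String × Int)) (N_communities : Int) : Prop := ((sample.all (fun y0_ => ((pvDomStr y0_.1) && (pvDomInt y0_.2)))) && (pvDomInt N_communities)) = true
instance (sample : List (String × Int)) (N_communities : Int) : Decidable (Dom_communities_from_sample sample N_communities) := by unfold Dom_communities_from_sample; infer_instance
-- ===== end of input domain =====

-- B replaces A's per-community rescans of the sample by one bucketing pass over the items (faster).

-- ===== PORT A =====
-- for k in range(N_communities): comm = [i for i in sample if sample[i] == k]; communities.append(set(comm))
def communities_from_sample (sample : List (String × Int)) (N_communities : Int) : List (List String) :=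
  let d := PySem.Dict.ofList sample
  (PySem.List.pyRange 0 N_communities 1).foldl
    (fun communities k =>
      let comm := d.keys.foldl
        (fun comm i => if d.getD i 0 == k then comm ++ [i] else comm) []
      communities ++ [PySem.Set.ofList comm]) []

-- ===== PORT B =====
-- buckets = [[] for _ in range(N)]; for key, value in sample.items(): if 0 <= value < N: buckets[value].append(key)
def communities_from_sample_alt (sample : List (String × Int)) (N_communities : Int) : List (List String) :=
  let d := PySem.Dict.ofList sample
  let buckets := d.items.foldl
    (fun (bs : List (List String)) kv =>
      if 0 ≤ kv.2 ∧ kv.2 < N_communities then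
        bs.set kv.2.toNat ((bs.getD kv.2.toNat []) ++ [kv.1])
      else bs)
    (List.replicate N_communities.toNat [])
  buckets.map (fun b => PySem.Set.ofList b)

-- ===== PRECONDITION & SPEC =====
def Spec_communities_from_sample (sample : List (String × Int)) (N_communities : Int) (out : List (List String)) : Prop := out = communities_from_sample_alt sample N_communities
instance (sample : List (String × Int)) (N_communities : Int) (out : List (List String)) : Decidable (Spec_communities_from_sample sample N_communities out) := by unfold Spec_communities_from_sample; infer_instance

-- ===== CLAIM (what is proved, stated in full; the proofs are below) =====
def Claim_equal_communities_from_sample : Prop := ∀ (sample : List (String × Int)) (N_communities : Int), Dom_communities_from_sample sample N_communities → Spec_communities_from_sample sample N_communities (communities_from_sample sample N_communities)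

-- ===== LEMMAS AND PROOFS =====

-- the per-community list both programs compute: keys of the items whose value is k
def pvBucket (items : List (String × Int)) (k : Int) : List String :=
  (items.filter (fun p => p.2 == k)).map (fun p => p.1)

-- A's inner loop over the dict's keys is the filter of the items by value
lemma a_comm_eq (d : PySem.Dict String Int) (hnd : d.keys.Nodup) (k : Int) :
    d.keys.filter (fun i => d.getD i 0 == k) = pvBucket d.items k := by
  unfold pvBucket
  rw [show d.keys = d.items.map (fun p => p.1) from rfl, List.filter_map]
  congr 1
  apply List.filter_congr
  intro p hp
  have := PySem.Dict.getD_of_mem_items d (k := p.1) (v := p.2) (by simpa using hp) hnd 0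
  simp [this]

-- B's bucketing invariant
lemma b_inv (N : Int) (l : List (String × Int)) (bs : List (List String))
    (hlen : bs.length = N.toNat) :
    (l.foldl (fun (bs : List (List String)) kv =>
        if 0 ≤ kv.2 ∧ kv.2 < N then
          bs.set kv.2.toNat ((bs.getD kv.2.toNat []) ++ [kv.1])
        else bs) bs).length = bs.length ∧
    ∀ j, j < bs.length →
      (l.foldl (fun (bs : List (List String)) kv =>
        if 0 ≤ kv.2 ∧ kv.2 < N then
          bs.set kv.2.toNat ((bs.getD kv.2.toNat []) ++ [kv.1])
        else bs) bs).getD j [] = bs.getD j [] ++ pvBucket l (j : Int) := by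
  induction l generalizing bs with
  | nil => simp [pvBucket]
  | cons kv l ih =>
    simp only [List.foldl_cons]
    by_cases h : 0 ≤ kv.2 ∧ kv.2 < N
    · rw [if_pos h]
      have hv : kv.2.toNat < bs.length := by omega
      have hset : (bs.set kv.2.toNat ((bs.getD kv.2.toNat []) ++ [kv.1])).length = bs.length := by
        simp
      obtain ⟨ih1, ih2⟩ := ih (bs.set kv.2.toNat ((bs.getD kv.2.toNat []) ++ [kv.1]))
        (by rw [hset, hlen])
      refine ⟨by rw [ih1, hset], ?_⟩
      intro j hj
      rw [ih2 j (by rw [hset]; exact hj)]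
      by_cases hje : j = kv.2.toNat
      · rw [hje]
        have h1 : (bs.set kv.2.toNat (bs.getD kv.2.toNat [] ++ [kv.1])).getD kv.2.toNat [] =
            bs.getD kv.2.toNat [] ++ [kv.1] := by
          simp [List.getD_eq_getElem?_getD, hv]
        have h2 : kv.2 == (kv.2.toNat : Int) := by simp; omega
        rw [h1]
        simp [pvBucket, h.1]
      · have h1 : (bs.set kv.2.toNat (bs.getD kv.2.toNat [] ++ [kv.1])).getD j [] = bs.getD j [] := by
          simp [List.getD_eq_getElem?_getD, Ne.symm hje]
        have h2 : (kv.2 == (j : Int)) = false := by simp; omega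
        rw [h1]
        simp [pvBucket, h2]
    · rw [if_neg h]
      obtain ⟨ih1, ih2⟩ := ih bs hlen
      refine ⟨ih1, ?_⟩
      intro j hj
      rw [ih2 j hj]
      have h2 : (kv.2 == (j : Int)) = false := by
        simp; omega
      simp [pvBucket, h2]

lemma pvBucket_nodup (items : List (String × Int)) (hnd : (items.map (fun p => p.1)).Nodup) (k : Int) :
    (pvBucket items k).Nodup := by
  exact List.Nodup.sublist (List.Sublist.map _ List.filter_sublist) hnd

-- ===== VERDICT (by name: the statement is the Claim_ definition above) =====
theorem communities_from_sample_spec : Claim_equal_communities_from_sample := by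
  intro sample N _
  unfold Spec_communities_from_sample communities_from_sample communities_from_sample_alt
  simp only []
  set d := PySem.Dict.ofList sample with hd
  have hnd : d.keys.Nodup := PySem.Dict.nodup_keys_ofList sample
  have hndm : (d.items.map (fun p => p.1)).Nodup := hnd
  -- A's inner loop is a filter, its outer loop is a map
  have hA : (PySem.List.pyRange 0 N 1).foldl
      (fun communities k =>
        let comm := d.keys.foldl
          (fun comm i => if d.getD i 0 == k then comm ++ [i] else comm) []
        communities ++ [PySem.Set.ofList comm]) [] =
      (PySem.List.pyRange 0 N 1).map (fun k => pvBucket d.items k) := by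
    have hbody : ∀ (acc : List (List String)) (k : Int),
        (fun communities k =>
          let comm := d.keys.foldl
            (fun comm i => if d.getD i 0 == k then comm ++ [i] else comm) []
          communities ++ [PySem.Set.ofList comm]) acc k = acc ++ [pvBucket d.items k] := by
      intro acc k
      show acc ++ [PySem.Set.ofList (d.keys.foldl
          (fun comm i => if d.getD i 0 == k then comm ++ [i] else comm) [])] = _
      rw [PySem.List.foldl_append_if_eq_filter (fun i => d.getD i 0 == k) d.keys []]
      rw [List.nil_append, a_comm_eq d hnd k,
        PySem.Set.ofList_eq_self_of_nodup _ (pvBucket_nodup d.items hndm k)]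
    calc (PySem.List.pyRange 0 N 1).foldl
          (fun communities k =>
            let comm := d.keys.foldl
              (fun comm i => if d.getD i 0 == k then comm ++ [i] else comm) []
            communities ++ [PySem.Set.ofList comm]) []
        = (PySem.List.pyRange 0 N 1).foldl (fun acc k => acc ++ [pvBucket d.items k]) [] := by
          exact PySem.List.foldl_congr_mem _ _ _ _ (fun acc k _ => hbody acc k)
      _ = _ := by rw [PySem.List.foldl_append_singleton_eq_map]; simp
  rw [hA]
  -- range as Nat range
  have hrange : PySem.List.pyRange 0 N 1 = (List.range N.toNat).map (fun j : Nat => (j : Int)) := by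
    rcases (by omega : 0 ≤ N ∨ N < 0) with hN | hN
    · calc PySem.List.pyRange 0 N 1
          = PySem.List.pyRange 0 ((N.toNat : Int)) 1 := by rw [Int.toNat_of_nonneg hN]
        _ = (List.range N.toNat).map (fun j : Nat => (j : Int)) :=
          PySem.List.pyRange_zero_natCast N.toNat
    · have h1 : PySem.List.pyRange 0 N 1 = [] := by simp [PySem.List.pyRange]; omega
      have h2 : N.toNat = 0 := by omega
      simp [h1, h2]
  rw [hrange, List.map_map]
  -- B's buckets
  obtain ⟨hlen, hget⟩ := b_inv N d.items (List.replicate N.toNat []) (by simp)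
  apply List.ext_getElem
  · rw [List.length_map, List.length_map, List.length_range, hlen, List.length_replicate]
  · intro j h1 h2
    have hj : j < N.toNat := by simpa using h1
    have hjb : j < (d.items.foldl (fun (bs : List (List String)) kv =>
        if 0 ≤ kv.2 ∧ kv.2 < N then
          bs.set kv.2.toNat ((bs.getD kv.2.toNat []) ++ [kv.1])
        else bs) (List.replicate N.toNat [])).length := by
      rw [hlen]; simpa using hj
    have hgd := hget j (by simpa using hj)
    rw [List.getD_eq_getElem?_getD, List.getElem?_eq_getElem hjb] at hgd
    have hrep : (List.replicate N.toNat ([] : List String)).getD j [] = [] := by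
      simp [List.getD_eq_getElem?_getD, hj]
    have hbj : (d.items.foldl (fun (bs : List (List String)) kv =>
        if 0 ≤ kv.2 ∧ kv.2 < N then
          bs.set kv.2.toNat ((bs.getD kv.2.toNat []) ++ [kv.1])
        else bs) (List.replicate N.toNat []))[j] = pvBucket d.items (j : Int) := by
      simpa [hrep] using hgd
    simp only [List.getElem_map, List.getElem_range, Function.comp_apply, hbj,
      PySem.Set.ofList_eq_self_of_nodup _ (pvBucket_nodup d.items hndm (j : Int))]
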